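-- pv_equiv track=rewrite | github.com/testloto/Meeting-ai-analyzer | app.py | get_health_emoji
-- ===== SOURCE A (Python) =====
-- HEALTH_EMOJIS = {
--     (90,100):("🏆","Exceptional","#10b981"),
--     (75, 89):("🌟","Excellent",  "#10b981"),
--     (60, 74):("✅","Good",       "#22c55e"),
--     (45, 59):("👍","Fair",       "#f59e0b"),
--     (30, 44):("⚠️","Needs Work", "#f97316"),
--     (0,  29):("🚨","Poor",       "#ef4444"),
-- }
--
-- def get_health_emoji(score_num):
--     try:
--         s = int(score_num)
--         for (lo,hi),(emoji,label,color) in HEALTH_EMOJIS.items():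
--             if lo <= s <= hi:
--                 return emoji, label, color
--     except Exception:
--         pass
--     return "❓","Unknown","#64748b"
-- ===== SOURCE B (Python) =====
-- CUTS = (30, 45, 60, 75, 90)
-- RESULTS = (
--     ("🚨", "Poor",        "#ef4444"),
--     ("⚠️", "Needs Work",  "#f97316"),
--     ("👍", "Fair",        "#f59e0b"),
--     ("✅", "Good",        "#22c55e"),
--     ("🌟", "Excellent",   "#10b981"),
--     ("🏆", "Exceptional", "#10b981"),
-- )
--
-- def get_health_emoji(score_num):
--     try:
--         s = int(score_num)
--         if 0 <= s <= 100:
--             return RESULTS[sum(c <= s for c in CUTS)]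
--     except Exception:
--         pass
--     return "❓", "Unknown", "#64748b"
-- ===== Notes on version B (the rewrite author's own statement) =====
-- stated objective: idiomatic
-- what changed: Replaced the linear scan over the dict of (lo,hi) range pairs with a cutoff table: the band index is the count of cutoffs at or below the score, looked up in a list ordered Poor..Exceptional, behind one explicit in-range guard.
import Mathlib
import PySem

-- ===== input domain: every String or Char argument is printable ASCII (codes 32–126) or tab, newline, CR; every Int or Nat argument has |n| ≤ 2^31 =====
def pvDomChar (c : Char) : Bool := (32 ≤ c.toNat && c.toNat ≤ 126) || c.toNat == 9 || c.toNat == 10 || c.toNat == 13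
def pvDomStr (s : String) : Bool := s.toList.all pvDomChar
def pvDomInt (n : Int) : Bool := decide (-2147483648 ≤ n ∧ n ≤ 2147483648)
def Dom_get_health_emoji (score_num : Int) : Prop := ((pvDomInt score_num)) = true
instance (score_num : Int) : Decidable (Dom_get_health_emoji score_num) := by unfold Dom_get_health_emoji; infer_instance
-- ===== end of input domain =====

-- B replaces A's linear scan over (lo,hi) range pairs by a cutoff-count index into an ordered band table (idiomatic, same cost).


-- ===== PORT A =====
-- the HEALTH_EMOJIS dict, in insertion order
def healthEmojis : List ((Int × Int) × (String × String × String)) :=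
  [ ((90, 100), ("🏆", "Exceptional", "#10b981")),
    ((75,  89), ("🌟", "Excellent",   "#10b981")),
    ((60,  74), ("✅", "Good",        "#22c55e")),
    ((45,  59), ("👍", "Fair",        "#f59e0b")),
    ((30,  44), ("⚠️", "Needs Work",  "#f97316")),
    (( 0,  29), ("🚨", "Poor",        "#ef4444")) ]

-- the for-loop over HEALTH_EMOJIS.items(): first matching band, else fall through
def healthLoop (s : Int) : List ((Int × Int) × (String × String × String)) → String × String × String
  | [] => ("❓", "Unknown", "#64748b")
  | ((lo, hi), r) :: rest => if lo ≤ s ∧ s ≤ hi then r else healthLoop s rest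

def get_health_emoji (score_num : Int) : String × String × String :=
  healthLoop score_num healthEmojis   -- int(score_num) is the identity on Int and never raises

-- ===== PORT B =====
def bCuts : List Int := [30, 45, 60, 75, 90]
def bResults : List (String × String × String) :=
  [ ("🚨", "Poor",        "#ef4444"),
    ("⚠️", "Needs Work",  "#f97316"),
    ("👍", "Fair",        "#f59e0b"),
    ("✅", "Good",        "#22c55e"),
    ("🌟", "Excellent",   "#10b981"),
    ("🏆", "Exceptional", "#10b981") ]

def get_health_emoji_alt (score_num : Int) : String × String × String :=
  if 0 ≤ score_num ∧ score_num ≤ 100 then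
    -- RESULTS[sum(c <= s for c in CUTS)]; the index is always in range, so pyGetD's default is never used
    PySem.List.pyGetD bResults (bCuts.countP (fun c => c ≤ score_num)) ("❓", "Unknown", "#64748b")
  else ("❓", "Unknown", "#64748b")

-- ===== PRECONDITION & SPEC =====
def Spec_get_health_emoji (score_num : Int) (out : String × String × String) : Prop := out = get_health_emoji_alt score_num
instance (score_num : Int) (out : String × String × String) : Decidable (Spec_get_health_emoji score_num out) := by unfold Spec_get_health_emoji; infer_instance

-- ===== CLAIM (what is proved, stated in full; the proofs are below) =====
def Claim_equal_get_health_emoji : Prop := ∀ (score_num : Int), Dom_get_health_emoji score_num → Spec_get_health_emoji score_num (get_health_emoji score_num)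

-- ===== LEMMAS AND PROOFS =====

-- ===== VERDICT (by name: the statement is the Claim_ definition above) =====
lemma alt_band_0 (s : Int) (h1 : 0 ≤ s) (h2 : s ≤ 29) :
    get_health_emoji_alt s = ("🚨", "Poor", "#ef4444") := by
  have c30 : decide ((30:Int) ≤ s) = false := by simp; omega
  have c45 : decide ((45:Int) ≤ s) = false := by simp; omega
  have c60 : decide ((60:Int) ≤ s) = false := by simp; omega
  have c75 : decide ((75:Int) ≤ s) = false := by simp; omega
  have c90 : decide ((90:Int) ≤ s) = false := by simp; omega
  have h0 : (0 ≤ s ∧ s ≤ 100) := by omega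
  simp only [get_health_emoji_alt, bCuts, bResults, List.countP, List.countP.go,
    c30, c45, c60, c75, c90, if_pos h0]
  rfl

lemma alt_band_1 (s : Int) (h1 : 30 ≤ s) (h2 : s ≤ 44) :
    get_health_emoji_alt s = ("⚠️", "Needs Work", "#f97316") := by
  have c30 : decide ((30:Int) ≤ s) = true := by simp; omega
  have c45 : decide ((45:Int) ≤ s) = false := by simp; omega
  have c60 : decide ((60:Int) ≤ s) = false := by simp; omega
  have c75 : decide ((75:Int) ≤ s) = false := by simp; omega
  have c90 : decide ((90:Int) ≤ s) = false := by simp; omega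
  have h0 : (0 ≤ s ∧ s ≤ 100) := by omega
  simp only [get_health_emoji_alt, bCuts, bResults, List.countP, List.countP.go,
    c30, c45, c60, c75, c90, if_pos h0]
  rfl

lemma alt_band_2 (s : Int) (h1 : 45 ≤ s) (h2 : s ≤ 59) :
    get_health_emoji_alt s = ("👍", "Fair", "#f59e0b") := by
  have c30 : decide ((30:Int) ≤ s) = true := by simp; omega
  have c45 : decide ((45:Int) ≤ s) = true := by simp; omega
  have c60 : decide ((60:Int) ≤ s) = false := by simp; omega
  have c75 : decide ((75:Int) ≤ s) = false := by simp; omega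
  have c90 : decide ((90:Int) ≤ s) = false := by simp; omega
  have h0 : (0 ≤ s ∧ s ≤ 100) := by omega
  simp only [get_health_emoji_alt, bCuts, bResults, List.countP, List.countP.go,
    c30, c45, c60, c75, c90, if_pos h0]
  rfl

lemma alt_band_3 (s : Int) (h1 : 60 ≤ s) (h2 : s ≤ 74) :
    get_health_emoji_alt s = ("✅", "Good", "#22c55e") := by
  have c30 : decide ((30:Int) ≤ s) = true := by simp; omega
  have c45 : decide ((45:Int) ≤ s) = true := by simp; omega
  have c60 : decide ((60:Int) ≤ s) = true := by simp; omega
  have c75 : decide ((75:Int) ≤ s) = false := by simp; omega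
  have c90 : decide ((90:Int) ≤ s) = false := by simp; omega
  have h0 : (0 ≤ s ∧ s ≤ 100) := by omega
  simp only [get_health_emoji_alt, bCuts, bResults, List.countP, List.countP.go,
    c30, c45, c60, c75, c90, if_pos h0]
  rfl

lemma alt_band_4 (s : Int) (h1 : 75 ≤ s) (h2 : s ≤ 89) :
    get_health_emoji_alt s = ("🌟", "Excellent", "#10b981") := by
  have c30 : decide ((30:Int) ≤ s) = true := by simp; omega
  have c45 : decide ((45:Int) ≤ s) = true := by simp; omega
  have c60 : decide ((60:Int) ≤ s) = true := by simp; omega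
  have c75 : decide ((75:Int) ≤ s) = true := by simp; omega
  have c90 : decide ((90:Int) ≤ s) = false := by simp; omega
  have h0 : (0 ≤ s ∧ s ≤ 100) := by omega
  simp only [get_health_emoji_alt, bCuts, bResults, List.countP, List.countP.go,
    c30, c45, c60, c75, c90, if_pos h0]
  rfl

lemma alt_band_5 (s : Int) (h1 : 90 ≤ s) (h2 : s ≤ 100) :
    get_health_emoji_alt s = ("🏆", "Exceptional", "#10b981") := by
  have c30 : decide ((30:Int) ≤ s) = true := by simp; omega
  have c45 : decide ((45:Int) ≤ s) = true := by simp; omega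
  have c60 : decide ((60:Int) ≤ s) = true := by simp; omega
  have c75 : decide ((75:Int) ≤ s) = true := by simp; omega
  have c90 : decide ((90:Int) ≤ s) = true := by simp; omega
  have h0 : (0 ≤ s ∧ s ≤ 100) := by omega
  simp only [get_health_emoji_alt, bCuts, bResults, List.countP, List.countP.go,
    c30, c45, c60, c75, c90, if_pos h0]
  rfl

lemma a_band (s : Int) :
    get_health_emoji s =
      if 90 ≤ s ∧ s ≤ 100 then ("🏆", "Exceptional", "#10b981")
      else if 75 ≤ s ∧ s ≤ 89 then ("🌟", "Excellent", "#10b981")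
      else if 60 ≤ s ∧ s ≤ 74 then ("✅", "Good", "#22c55e")
      else if 45 ≤ s ∧ s ≤ 59 then ("👍", "Fair", "#f59e0b")
      else if 30 ≤ s ∧ s ≤ 44 then ("⚠️", "Needs Work", "#f97316")
      else if 0 ≤ s ∧ s ≤ 29 then ("🚨", "Poor", "#ef4444")
      else ("❓", "Unknown", "#64748b") := by
  simp only [get_health_emoji, healthEmojis, healthLoop]

theorem get_health_emoji_spec : Claim_equal_get_health_emoji := by
  intro s _
  unfold Spec_get_health_emoji
  rw [a_band]
  split_ifs with h1 h2 h3 h4 h5 h6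
  · exact (alt_band_5 s h1.1 h1.2).symm
  · exact (alt_band_4 s h2.1 h2.2).symm
  · exact (alt_band_3 s h3.1 h3.2).symm
  · exact (alt_band_2 s h4.1 h4.2).symm
  · exact (alt_band_1 s h5.1 h5.2).symm
  · exact (alt_band_0 s h6.1 h6.2).symm
  · have : ¬ (0 ≤ s ∧ s ≤ 100) := by omega
    simp [get_health_emoji_alt, this]
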